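-- pv_equiv track=rewrite | github.com/hschoon-dev/asyncua-network-fuzzing | asyncua-wireshark-captures/pyshark-convert-v2.py | create_readable_enhanced_hex_string
-- ===== SOURCE A (Python) =====
-- def extract_readable_text(binary_data):
--     """Extract all readable ASCII text from binary data."""
--     result = []
--     current_text = ""
--     positions = []  # Track start and end positions
--     start_pos = None
--
--     for i, byte in enumerate(binary_data):
--         # Check if byte is printable ASCII
--         if 32 <= byte <= 126:
--             if current_text == "":  # Start of a new text segment
--                 start_pos = i
--             current_text += chr(byte)
--         else:
--             if current_text and len(current_text) >= 3:  # Only keep text segments of 3+ chars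
--                 result.append(current_text)
--                 positions.append((start_pos, i - 1))  # End position is the last character
--             current_text = ""
--             start_pos = None
--
--     # Add the last segment if it exists
--     if current_text and len(current_text) >= 3:
--         result.append(current_text)
--         positions.append((start_pos, len(binary_data) - 1))
--
--     return result, positions
--
-- def create_readable_enhanced_hex_string(binary_data):
--     """Create a hex string with readable text parts embedded."""
--     readable_parts, positions = extract_readable_text(binary_data)
--
--     # Start with the standard hex string
--     hex_string = ''.join('\\x{:02x}'.format(b) for b in binary_data)
--
--     # Replace hex values with readable text for each position
--     enhanced_string = hex_string
--     offset = 0  # Track offset changes as we modify the string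
--
--     for text, (start, end) in zip(readable_parts, positions):
--         # Calculate positions in the hex string
--         hex_start = start * 4 + offset  # Each byte is represented as \xXX (4 chars)
--         hex_end = (end + 1) * 4 + offset
--
--         # Replace with the actual text without quotes
--         replacement = text
--         enhanced_string = enhanced_string[:hex_start] + replacement + enhanced_string[hex_end:]
--
--         # Update offset for next replacements
--         offset += len(replacement) - (hex_end - hex_start)
--
--     return f"b'{enhanced_string}'"
-- ===== SOURCE B (Python) =====
-- def create_readable_enhanced_hex_string(binary_data):
--     """Create a hex string with readable text parts embedded.
--
--     One pass with a character cursor into the rendered hex string: for each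
--     printable run of 3+ bytes, emit the hex chars between the cursor and the
--     run's slot (4 chars per byte), then the run as text, and move the cursor
--     past the run's slot.  No position lists, no offset-adjusted re-splicing.
--     """
--     hex_string = ''.join('\\x{:02x}'.format(b) for b in binary_data)
--     n = len(binary_data)
--     out = []
--     cursor = 0  # character position in hex_string
--     i = 0
--     while i < n:
--         if 32 <= binary_data[i] <= 126:
--             j = i
--             while j < n and 32 <= binary_data[j] <= 126:
--                 j += 1
--             if j - i >= 3:
--                 out.append(hex_string[cursor:4 * i])
--                 out.append(''.join(chr(b) for b in binary_data[i:j]))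
--                 cursor = 4 * j
--             i = j
--         else:
--             i += 1
--     out.append(hex_string[cursor:])
--     return "b'{}'".format(''.join(out))
-- ===== Notes on version B (the rewrite author's own statement) =====
-- stated objective: simpler
-- what changed: B replaces A's three-phase pipeline (extract runs with a positions list, render the full hex string, then repeatedly re-splice that string with offset arithmetic) by a single scan that keeps one character cursor into the rendered hex string and emits gap-hex and run-text pieces directly.
import Mathlib
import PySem

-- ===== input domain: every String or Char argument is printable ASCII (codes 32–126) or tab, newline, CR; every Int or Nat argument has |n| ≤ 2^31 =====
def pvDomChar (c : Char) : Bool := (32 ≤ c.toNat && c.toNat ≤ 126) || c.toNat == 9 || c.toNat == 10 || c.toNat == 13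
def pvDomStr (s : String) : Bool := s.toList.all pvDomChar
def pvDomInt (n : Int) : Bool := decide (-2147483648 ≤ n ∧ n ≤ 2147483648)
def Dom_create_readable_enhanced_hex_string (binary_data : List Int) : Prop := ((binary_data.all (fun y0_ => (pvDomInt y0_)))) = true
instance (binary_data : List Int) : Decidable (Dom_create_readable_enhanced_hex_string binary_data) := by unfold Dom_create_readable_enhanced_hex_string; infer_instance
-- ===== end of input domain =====

-- B replaces A's extract-positions / render-hex / offset-adjusted-splice pipeline by a single pass with a
-- character cursor into the rendered hex string; proved to return the same string on every input.

-- ===== PORT A =====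
-- '{:02x}'.format(b): hand-ported (PySem has no hex format). Exact: lowercase hex of |b|,
-- '-' sign first for negatives, zero-padded to TOTAL width 2 (sign included), as CPython does.
def pvHexLoop : Nat → Nat → List Char → List Char
  | 0, _, acc => acc
  | fuel+1, n, acc =>
    if n < 16 then Nat.digitChar n :: acc
    else pvHexLoop fuel (n / 16) (Nat.digitChar (n % 16) :: acc)

def pvHexChars (n : Nat) : List Char := pvHexLoop (n+1) n []

def pyFmt02x (b : Int) : List Char :=
  if b < 0 then '-' :: (List.replicate (1 - (pvHexChars (-b).toNat).length) '0' ++ pvHexChars (-b).toNat)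
  else List.replicate (2 - (pvHexChars b.toNat).length) '0' ++ pvHexChars b.toNat

-- '\\x{:02x}'.format(b) (the two-character backslash-x prefix, then the formatted byte)
def pyHexEsc (b : Int) : List Char := '\\' :: 'x' :: pyFmt02x b

-- loop body of extract_readable_text; state = (result, current_text, positions, start_pos)
def extractStep (st : List (List Char) × List Char × List (Int × Int) × Option Int)
    (p : Int × Int) : List (List Char) × List Char × List (Int × Int) × Option Int :=
  let (result, current_text, positions, start_pos) := st
  let (i, byte) := p
  if 32 ≤ byte ∧ byte ≤ 126 then
    let start_pos := if current_text = [] then some i else start_pos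
    (result, current_text ++ [Char.ofNat byte.toNat], positions, start_pos)
  else
    if current_text ≠ [] ∧ 3 ≤ current_text.length then
      (result ++ [current_text], [], positions ++ [(start_pos.getD 0, i - 1)], none)
    else
      (result, [], positions, none)

-- start_pos is always `some` when it is read (current_text nonempty), so `.getD 0` is exact
def extract_readable_text (binary_data : List Int) :
    List (List Char) × List (Int × Int) :=
  let st := (PySem.List.enumerate binary_data 0).foldl extractStep ([], [], [], none)
  let (result, current_text, positions, start_pos) := st
  if current_text ≠ [] ∧ 3 ≤ current_text.length then
    (result ++ [current_text], positions ++ [(start_pos.getD 0, (binary_data.length : Int) - 1)])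
  else
    (result, positions)

-- loop body of the splicing loop; state = (enhanced_string, offset)
def spliceStep (st : List Char × Int) (tp : List Char × (Int × Int)) : List Char × Int :=
  let (enhanced, offset) := st
  let (text, se) := tp
  let hexStart := se.1 * 4 + offset
  let hexEnd := (se.2 + 1) * 4 + offset
  (PySem.List.slice enhanced none (some hexStart) ++ text ++ PySem.List.slice enhanced (some hexEnd) none,
   offset + (text.length : Int) - (hexEnd - hexStart))

def create_readable_enhanced_hex_string (binary_data : List Int) : String :=
  let rp := extract_readable_text binary_data
  let hex_string := (binary_data.map pyHexEsc).flatten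
  let res := (rp.1.zip rp.2).foldl spliceStep (hex_string, 0)
  String.ofList ('b' :: '\'' :: (res.1 ++ ['\'']))

-- ===== PORT B =====
-- the outer while-loop: scan for a printable run (the inner while = takeWhile), splice by cursor
def pvAltLoop (hex_string : List Char) (cursor : Int) (i : Int) : List Int → List (List Char)
  | [] => [PySem.List.slice hex_string (some cursor) none]
  | x :: xs =>
    if 32 ≤ x ∧ x ≤ 126 then
      let r := x :: xs.takeWhile (fun b => decide (32 ≤ b ∧ b ≤ 126))
      if 3 ≤ r.length then
        PySem.List.slice hex_string (some cursor) (some (4 * i))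
          :: r.map (fun b => Char.ofNat b.toNat)
          :: pvAltLoop hex_string (4 * (i + r.length)) (i + r.length)
               (xs.dropWhile (fun b => decide (32 ≤ b ∧ b ≤ 126)))
      else
        pvAltLoop hex_string cursor (i + r.length)
          (xs.dropWhile (fun b => decide (32 ≤ b ∧ b ≤ 126)))
    else pvAltLoop hex_string cursor (i + 1) xs
termination_by l => l.length
decreasing_by
  · simpa using Nat.lt_succ_of_le (List.length_dropWhile_le _ xs)
  · simpa using Nat.lt_succ_of_le (List.length_dropWhile_le _ xs)
  · simp

def create_readable_enhanced_hex_string_alt (binary_data : List Int) : String :=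
  let hex_string := (binary_data.map pyHexEsc).flatten
  String.ofList ('b' :: '\'' :: ((pvAltLoop hex_string 0 0 binary_data).flatten ++ ['\'']))

-- ===== PRECONDITION & SPEC =====
def Spec_create_readable_enhanced_hex_string (binary_data : List Int) (out : String) : Prop :=
  out = create_readable_enhanced_hex_string_alt binary_data
instance (binary_data : List Int) (out : String) : Decidable (Spec_create_readable_enhanced_hex_string binary_data out) := by
  unfold Spec_create_readable_enhanced_hex_string; infer_instance

-- ===== CLAIM (what is proved, stated in full; the proofs are below) =====
def Claim_equal_create_readable_enhanced_hex_string : Prop := ∀ (binary_data : List Int), Dom_create_readable_enhanced_hex_string binary_data → Spec_create_readable_enhanced_hex_string binary_data (create_readable_enhanced_hex_string binary_data)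

-- ===== LEMMAS AND PROOFS =====

-- printability test, Bool form, shared by the proof-side run decomposition
def pvPr (b : Int) : Bool := decide (32 ≤ b ∧ b ≤ 126)

-- Char for a printable byte
def pvChr (b : Int) : Char := Char.ofNat b.toNat

-- the maximal printable runs of length ≥ 3, with their absolute start positions
def pvRuns (i : Int) : List Int → List (List Int × Int)
  | [] => []
  | x :: xs =>
    if pvPr x then
      let r := x :: xs.takeWhile pvPr
      (if 3 ≤ r.length then [(r, i)] else []) ++ pvRuns (i + r.length) (xs.dropWhile pvPr)
    else pvRuns (i + 1) xs
termination_by l => l.length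
decreasing_by
  · simpa using Nat.lt_succ_of_le (List.length_dropWhile_le pvPr xs)
  · simp


-- unfold lemmas for the run decomposition
theorem pvRuns_nil {i : Int} : pvRuns i [] = [] := by simp [pvRuns]

theorem pvRuns_cons_pos {i x : Int} {xs : List Int} (hx : pvPr x = true) :
    pvRuns i (x :: xs)
      = (if 3 ≤ (x :: xs.takeWhile pvPr).length then [(x :: xs.takeWhile pvPr, i)] else [])
        ++ pvRuns (i + (x :: xs.takeWhile pvPr).length) (xs.dropWhile pvPr) := by
  rw [pvRuns]; simp [hx]

theorem pvRuns_cons_neg {i x : Int} {xs : List Int} (hx : pvPr x = false) :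
    pvRuns i (x :: xs) = pvRuns (i + 1) xs := by
  rw [pvRuns]; simp [hx]

theorem pvRuns_printable {j : Int} {run : List Int} (h : ∀ b ∈ run, pvPr b = true) :
    pvRuns j run = if 3 ≤ run.length then [(run, j)] else [] := by
  match run with
  | [] => simp [pvRuns]
  | y :: ys =>
    have hy : pvPr y = true := h y (by simp)
    have hys : ∀ b ∈ ys, pvPr b = true := fun b hb => h b (by simp [hb])
    rw [pvRuns_cons_pos hy, List.takeWhile_eq_self_iff.mpr hys,
      List.dropWhile_eq_nil_iff.mpr hys, pvRuns_nil]
    simp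

theorem pvRuns_flush {j : Int} {run : List Int} {x : Int} {xs : List Int}
    (h : ∀ b ∈ run, pvPr b = true) (hx : pvPr x = false) :
    pvRuns j (run ++ x :: xs)
      = (if 3 ≤ run.length then [(run, j)] else []) ++ pvRuns (j + run.length + 1) xs := by
  match run with
  | [] =>
    rw [List.nil_append, pvRuns_cons_neg hx]
    simp
  | y :: ys =>
    have hy : pvPr y = true := h y (by simp)
    have hys : ∀ b ∈ ys, pvPr b = true := fun b hb => h b (by simp [hb])
    rw [List.cons_append, pvRuns_cons_pos hy,
      List.takeWhile_append_of_pos hys, List.takeWhile_cons_of_neg (by simp [hx]),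
      List.dropWhile_append_of_pos hys, List.dropWhile_cons_of_neg (by simp [hx]),
      pvRuns_cons_neg hx]
    simp only [List.append_nil, List.length_cons]
    rfl

-- A's extract loop: from a pending printable run, the flushed result is the run decomposition
def pvEflush (e : Int) (st : List (List Char) × List Char × List (Int × Int) × Option Int) :
    List (List Char) × List (Int × Int) :=
  if st.2.1 ≠ [] ∧ 3 ≤ st.2.1.length then
    (st.1 ++ [st.2.1], st.2.2.1 ++ [(st.2.2.2.getD 0, e)])
  else (st.1, st.2.2.1)

theorem pvExtract_inv : ∀ (data : List Int) (i : Int) (res : List (List Char))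
    (pos : List (Int × Int)) (run : List Int), (∀ b ∈ run, pvPr b = true) →
    pvEflush (i + data.length - 1)
      ((PySem.List.enumerate data i).foldl extractStep
        (res, run.map pvChr, pos, if run.length = 0 then none else some (i - run.length)))
      = (res ++ (pvRuns (i - run.length) (run ++ data)).map (fun q => q.1.map pvChr),
         pos ++ (pvRuns (i - run.length) (run ++ data)).map
           (fun q => (q.2, q.2 + (q.1.length : Int) - 1))) := by
  intro data
  induction data with
  | nil =>
    intro i res pos run h
    rw [PySem.List.enumerate_nil, List.foldl_nil, List.append_nil, pvRuns_printable h]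
    by_cases hr : run = []
    · subst hr; simp [pvEflush]
    · have hne : run.length ≠ 0 := by simpa using hr
      by_cases h3 : 3 ≤ run.length
      · rw [if_pos h3]
        simp [pvEflush, hne, hr, h3]
      · rw [if_neg h3]
        simp [pvEflush, hr, h3]
  | cons x xs ih =>
    intro i res pos run h
    rw [PySem.List.enumerate_cons, List.foldl_cons,
      show (i + ((x :: xs).length : Int) - 1) = (i + 1 + (xs.length : Int) - 1) by
        push_cast [List.length_cons]; ring]
    by_cases hx : 32 ≤ x ∧ x ≤ 126
    · have hx' : pvPr x = true := by simp [pvPr, hx]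
      have hstep : extractStep (res, run.map pvChr, pos,
            if run.length = 0 then none else some (i - run.length)) (i, x)
          = (res, (run ++ [x]).map pvChr, pos,
             if (run ++ [x]).length = 0 then none else some ((i+1) - ((run ++ [x]).length : Int))) := by
        by_cases hr : run = []
        · subst hr; simp [extractStep, hx, pvChr]
        · have hne : run.length ≠ 0 := by simpa using hr
          simp [extractStep, hx, hne, hr, pvChr]
      rw [hstep]
      have hrec := ih (i+1) res pos (run ++ [x]) (by
        intro b hb
        rcases List.mem_append.mp hb with hb | hb
        · exact h b hb
        · simp at hb; subst hb; exact hx')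
      rw [hrec]
      have harith : (i+1) - ((run ++ [x]).length : Int) = i - run.length := by
        push_cast [List.length_append, List.length_cons, List.length_nil]; ring
      rw [harith, List.append_assoc, List.singleton_append]
    · have hx' : pvPr x = false := by simp [pvPr]; omega
      have hflush : pvRuns (i - run.length) (run ++ x :: xs)
          = (if 3 ≤ run.length then [(run, i - run.length)] else [])
            ++ pvRuns (i + 1) xs := by
        rw [pvRuns_flush h hx']
        congr 2
        ring
      by_cases h3 : run ≠ [] ∧ 3 ≤ run.length
      · have hne : run.length ≠ 0 := by simpa using h3.1
        have hstep : extractStep (res, run.map pvChr, pos,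
              if run.length = 0 then none else some (i - run.length)) (i, x)
            = (res ++ [run.map pvChr], [], pos ++ [(i - run.length, i - 1)], none) := by
          simp [extractStep, show ¬ (32 ≤ x ∧ x ≤ 126) from hx, hne, h3.1, h3.2]
        rw [hstep]
        have hrec := ih (i+1) (res ++ [run.map pvChr]) (pos ++ [(i - run.length, i - 1)]) [] (by simp)
        simp only [List.map_nil, List.length_nil, Nat.cast_zero, if_true,
          List.nil_append, sub_zero] at hrec
        rw [hrec, hflush, if_pos h3.2]
        simp only [List.map_append, List.map_cons, List.map_nil, ← List.append_assoc]
        rw [show i - (run.length : Int) + run.length - 1 = i - 1 by ring]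
      · have hstep : extractStep (res, run.map pvChr, pos,
              if run.length = 0 then none else some (i - run.length)) (i, x)
            = (res, [], pos, none) := by
          rcases Decidable.not_and_iff_not_or_not.mp h3 with hc | hc
          · have hre : run = [] := by simpa using hc
            subst hre; simp [extractStep, show ¬ (32 ≤ x ∧ x ≤ 126) from hx]
          · simp [extractStep, show ¬ (32 ≤ x ∧ x ≤ 126) from hx, hc]
        rw [hstep]
        have hrec := ih (i+1) res pos [] (by simp)
        simp only [List.map_nil, List.length_nil, Nat.cast_zero, if_true,
          List.nil_append, sub_zero] at hrec
        rw [hrec, hflush]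
        have h3' : ¬ 3 ≤ run.length := by
          by_cases hr : run = []
          · subst hr; simp
          · exact fun hc => h3 ⟨hr, hc⟩
        rw [if_neg h3', List.nil_append]


-- the extract result, in closed form
theorem pvExtract_eq (data : List Int) :
    extract_readable_text data
      = ((pvRuns 0 data).map (fun q => q.1.map pvChr),
         (pvRuns 0 data).map (fun q => (q.2, q.2 + (q.1.length : Int) - 1))) := by
  have h := pvExtract_inv data 0 [] [] [] (by simp)
  simp only [List.map_nil, List.length_nil, Nat.cast_zero, if_true, List.nil_append,
    sub_zero, zero_add] at h
  unfold extract_readable_text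
  unfold pvEflush at h
  exact h
-- unfold lemmas for B's loop (the port's inline predicate is definitionally pvPr)
theorem pvPr_def : (fun b : Int => decide (32 ≤ b ∧ b ≤ 126)) = pvPr := rfl

theorem pvAlt_nil {H : List Char} {c i : Int} :
    pvAltLoop H c i [] = [PySem.List.slice H (some c) none] := by
  simp [pvAltLoop]

theorem pvAlt_cons_neg {H : List Char} {c i x : Int} {xs : List Int} (hx : pvPr x = false) :
    pvAltLoop H c i (x :: xs) = pvAltLoop H c (i + 1) xs := by
  rw [pvAltLoop]
  simp [show ¬ (32 ≤ x ∧ x ≤ 126) by simpa [pvPr] using hx]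

theorem pvAlt_cons_pos_short {H : List Char} {c i x : Int} {xs : List Int}
    (hx : pvPr x = true) (h3 : ¬ 3 ≤ (x :: xs.takeWhile pvPr).length) :
    pvAltLoop H c i (x :: xs)
      = pvAltLoop H c (i + ((x :: xs.takeWhile pvPr).length : Int)) (xs.dropWhile pvPr) := by
  rw [pvAltLoop, pvPr_def]
  simp [show (32 ≤ x ∧ x ≤ 126) by simpa [pvPr] using hx,
    show ¬ 2 ≤ (xs.takeWhile pvPr).length by simpa using h3]

theorem pvAlt_cons_pos_long {H : List Char} {c i x : Int} {xs : List Int}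
    (hx : pvPr x = true) (h3 : 3 ≤ (x :: xs.takeWhile pvPr).length) :
    pvAltLoop H c i (x :: xs)
      = PySem.List.slice H (some c) (some (4 * i))
        :: (x :: xs.takeWhile pvPr).map pvChr
        :: pvAltLoop H (4 * (i + ((x :: xs.takeWhile pvPr).length : Int)))
             (i + ((x :: xs.takeWhile pvPr).length : Int)) (xs.dropWhile pvPr) := by
  rw [pvAltLoop, pvPr_def]
  simp [show (32 ≤ x ∧ x ≤ 126) by simpa [pvPr] using hx,
    show 2 ≤ (xs.takeWhile pvPr).length by simpa using h3, pvChr]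

-- every escape is at least 4 characters, so the hex string covers 4 characters per byte
theorem pvFour_le_esc (b : Int) : 4 ≤ (pyHexEsc b).length := by
  unfold pyHexEsc pyFmt02x
  split <;> simp <;> omega

theorem pvFour_le_hexmap (l : List Int) : 4 * l.length ≤ ((l.map pyHexEsc).flatten).length := by
  induction l with
  | nil => simp
  | cons x xs ih =>
    simp only [List.map_cons, List.flatten_cons, List.length_append, List.length_cons]
    have := pvFour_le_esc x
    omega

-- the splice loop, started on a state P ++ H[c:] with offset |P| - c, produces B's pieces
theorem pvSpliceAlt : ∀ (i : Int) (data : List Int), 0 ≤ i →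
    ∀ (H P : List Char) (c : Int), 0 ≤ c → c ≤ 4 * i →
    4 * (i + data.length) ≤ (H.length : Int) →
    (((pvRuns i data).map (fun q => (q.1.map pvChr, (q.2, q.2 + (q.1.length : Int) - 1)))).foldl
        spliceStep (P ++ H.drop c.toNat, (P.length : Int) - c)).1
      = P ++ (pvAltLoop H c i data).flatten := by
  intro i data
  induction i, data using pvRuns.induct with
  | case1 i =>
    intro hi H P c hc hci hH
    rw [pvRuns_nil, pvAlt_nil]
    simp [PySem.List.slice_from _ hc]
  | case2 i x xs hx r ih =>
    intro hi H P c hc hci hH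
    have hr_def : r = x :: xs.takeWhile pvPr := rfl
    rw [hr_def] at ih
    have hsplit : (xs.takeWhile pvPr).length + (xs.dropWhile pvPr).length = xs.length := by
      rw [← List.length_append, List.takeWhile_append_dropWhile]
    have hlnn : (0:Int) ≤ ((x :: xs.takeWhile pvPr).length : Int) := by positivity
    have hnn : (0:Int) ≤ i + ((x :: xs.takeWhile pvPr).length : Int) := by omega
    have hco : ((x :: xs).length : Int)
        = ((x :: xs.takeWhile pvPr).length : Int) + ((xs.dropWhile pvPr).length : Int) := by
      push_cast [List.length_cons, ← hsplit]; ring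
    have hH' : 4 * ((i + ((x :: xs.takeWhile pvPr).length : Int)) + ((xs.dropWhile pvPr).length : Int))
        ≤ (H.length : Int) := by omega
    rw [pvRuns_cons_pos hx]
    by_cases h3 : 3 ≤ (x :: xs.takeWhile pvPr).length
    · rw [if_pos h3, List.map_append, List.map_cons, List.map_nil, List.singleton_append,
        List.foldl_cons, pvAlt_cons_pos_long hx h3]
      have hstep : spliceStep (P ++ H.drop c.toNat, (P.length : Int) - c)
            ((x :: xs.takeWhile pvPr).map pvChr,
              (i, i + ((x :: xs.takeWhile pvPr).length : Int) - 1))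
          = ((P ++ PySem.List.slice H (some c) (some (4 * i))
                ++ (x :: xs.takeWhile pvPr).map pvChr)
              ++ H.drop (4 * (i + ((x :: xs.takeWhile pvPr).length : Int))).toNat,
             ((P ++ PySem.List.slice H (some c) (some (4 * i))
                ++ (x :: xs.takeWhile pvPr).map pvChr).length : Int)
               - 4 * (i + ((x :: xs.takeWhile pvPr).length : Int))) := by
        unfold spliceStep
        have e1 : i * 4 + ((P.length : Int) - c)
            = ((P.length + (4 * i - c).toNat : Nat) : Int) := by omega
        have e2 : (i + ((x :: xs.takeWhile pvPr).length : Int) - 1 + 1) * 4 + ((P.length : Int) - c)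
            = ((P.length + (4 * (i + ((x :: xs.takeWhile pvPr).length : Int)) - c).toNat : Nat) : Int) := by
          omega
        simp only [e1, e2]
        rw [PySem.List.slice_to _ (by positivity), PySem.List.slice_from _ (by positivity),
          Int.toNat_natCast, Int.toNat_natCast, List.take_length_add_append,
          List.drop_length_add_append, List.drop_drop,
          PySem.List.slice_toNat _ hc (by positivity)]
        simp only [Prod.mk.injEq]
        constructor
        · rw [show (4 * i).toNat - c.toNat = (4 * i - c).toNat by omega,
            show c.toNat + (4 * (i + ((x :: xs.takeWhile pvPr).length : Int)) - c).toNat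
              = (4 * (i + ((x :: xs.takeWhile pvPr).length : Int))).toNat by omega]
        · push_cast [List.length_append, List.length_map, List.length_take, List.length_drop]
          omega
      rw [hstep, ih hnn H _ (4 * (i + ((x :: xs.takeWhile pvPr).length : Int)))
        (by positivity) le_rfl (by omega)]
      simp [List.append_assoc]
    · rw [if_neg h3, List.nil_append, pvAlt_cons_pos_short hx h3]
      exact ih hnn H P c hc (by omega) (by omega)
  | case3 i x xs hx ih =>
    intro hi H P c hc hci hH
    have hx' : pvPr x = false := by simpa using hx
    rw [pvRuns_cons_neg hx', pvAlt_cons_neg hx']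
    have : ((x :: xs).length : Int) = (xs.length : Int) + 1 := by push_cast [List.length_cons]; ring
    exact ih (by omega) H P c hc (by omega) (by omega)

-- A's pipeline equals B's single pass
theorem pvMain (data : List Int) :
    create_readable_enhanced_hex_string data = create_readable_enhanced_hex_string_alt data := by
  unfold create_readable_enhanced_hex_string create_readable_enhanced_hex_string_alt
  rw [pvExtract_eq]
  simp only [List.zip_map']
  have hs := pvSpliceAlt 0 data le_rfl ((data.map pyHexEsc).flatten) [] 0 le_rfl (by simp)
    (by simpa using (Nat.cast_le (α := Int)).mpr (pvFour_le_hexmap data))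
  simp only [Int.toNat_zero, List.drop_zero, List.nil_append, List.length_nil,
    Nat.cast_zero, sub_zero] at hs
  rw [hs]

-- ===== VERDICT (by name: the statement is the Claim_ definition above) =====
theorem create_readable_enhanced_hex_string_spec : Claim_equal_create_readable_enhanced_hex_string := by
  intro data _hdom
  unfold Spec_create_readable_enhanced_hex_string
  exact pvMain data
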